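-- pv_equiv track=rewrite | github.com/kylasweb/AI-IVR-v2 | ivr-backend/services/manglish_service.py | _phonetic_conversion
-- ===== SOURCE A (Python) =====
-- def _phonetic_conversion(text: str) -> str:
--     """Apply phonetic conversion rules"""
--     # This is a simplified phonetic conversion
--     # In a production system, you'd use more sophisticated transliteration
--
--     # Common phonetic patterns
--     phonetic_rules = {
--         "namaskaram": "നമസ്കാരം",
--         "enthanu": "എന്താണ്",
--         "engane": "എങ്ങനെ",
--         "evide": "എവിടെ",
--         "dayavayi": "ദയവായി",
--         "sahayam": "സഹായം"
--     }
--
--     for pattern, replacement in phonetic_rules.items():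
--         if pattern in text:
--             text = text.replace(pattern, replacement)
--
--     return text
-- ===== SOURCE B (Python) =====
-- import re
--
-- _PHONETIC_RULES = {
--     "namaskaram": "നമസ്കാരം",
--     "enthanu": "എന്താണ്",
--     "engane": "എങ്ങനെ",
--     "evide": "എവിടെ",
--     "dayavayi": "ദയവായി",
--     "sahayam": "സഹായം",
-- }
--
-- _PHONETIC_RE = re.compile("|".join(map(re.escape, _PHONETIC_RULES)))
--
--
-- def _phonetic_conversion(text: str) -> str:
--     """Apply phonetic conversion rules"""
--     return _PHONETIC_RE.sub(lambda m: _PHONETIC_RULES[m.group(0)], text)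
-- ===== Notes on version B (the rewrite author's own statement) =====
-- stated objective: idiomatic
-- what changed: B compiles the six fixed keys into one alternation regex and rewrites the text in a single left-to-right re.sub scan, instead of A's six sequential full-text replace passes in dict order.
-- outside the precondition, e.g. on _phonetic_conversion('evidengane'): A returns 'evidഎങ്ങനെ', B returns 'എവിടെngane'; on _phonetic_conversion('enganenthanu'): A returns 'enganഎന്താണ്', B returns 'എങ്ങനെnthanu'; on _phonetic_conversion('evidenthanu'): A returns 'evidഎന്താണ്', B returns 'എവിടെnthanu'
import Mathlib
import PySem

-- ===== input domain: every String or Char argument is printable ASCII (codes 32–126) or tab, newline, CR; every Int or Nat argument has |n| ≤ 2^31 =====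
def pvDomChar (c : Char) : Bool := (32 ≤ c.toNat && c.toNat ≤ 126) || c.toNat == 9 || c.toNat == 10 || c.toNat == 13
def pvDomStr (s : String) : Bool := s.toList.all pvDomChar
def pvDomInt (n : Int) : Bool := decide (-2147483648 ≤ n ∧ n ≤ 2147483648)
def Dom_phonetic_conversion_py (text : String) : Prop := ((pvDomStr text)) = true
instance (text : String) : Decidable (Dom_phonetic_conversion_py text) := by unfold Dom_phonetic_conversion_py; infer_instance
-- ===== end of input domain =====

-- B replaces A's six sequential dict-order replace passes (return value only; A mutates no argument)
-- by one left-to-right scan that substitutes the first matching key at each position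
-- (a compiled alternation regex in Python code Source B).

-- ===== PORT A =====
-- the phonetic_rules dict of the Python source A, in insertion order
def pvRules : List (List Char × List Char) :=
  [("namaskaram".toList, "നമസ്കാരം".toList),
   ("enthanu".toList, "എന്താണ്".toList),
   ("engane".toList, "എങ്ങനെ".toList),
   ("evide".toList, "എവിടെ".toList),
   ("dayavayi".toList, "ദയവായി".toList),
   ("sahayam".toList, "സഹായം".toList)]

-- for pattern, replacement in phonetic_rules.items(): if pattern in text: text = text.replace(pattern, replacement)
def phonetic_conversion_py (text : String) : String :=
  String.ofList (pvRules.foldl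
    (fun t pr => if PySem.Chars.isIn pr.1 t then PySem.Chars.replace t pr.1 pr.2 else t)
    text.toList)

-- ===== PORT B =====
-- B's alternation table: the alternatives of the compiled regex, in the order they were joined
def pvAltRules : List (List Char × List Char) :=
  [("namaskaram".toList, "നമസ്കാരം".toList),
   ("enthanu".toList, "എന്താണ്".toList),
   ("engane".toList, "എങ്ങനെ".toList),
   ("evide".toList, "എവിടെ".toList),
   ("dayavayi".toList, "ദയവായി".toList),
   ("sahayam".toList, "സഹായം".toList)]

-- the single regex scan of Source B: at each position the first alternative that matches is
-- substituted and the scan resumes right after it; every key is nonempty, so a match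
-- consumes at least one character (cs.drop (len-1) = (c::cs).drop len)
def pvScan (rules : List (List Char × List Char)) : List Char → List Char
  | [] => []
  | c :: cs =>
    match rules.find? (fun pr => pr.1.isPrefixOf (c :: cs)) with
    | some pr => pr.2 ++ pvScan rules (cs.drop (pr.1.length - 1))
    | none => c :: pvScan rules cs
termination_by t => t.length
decreasing_by
  all_goals (simp; try omega)

def phonetic_conversion_py_alt (text : String) : String :=
  String.ofList (pvScan pvAltRules text.toList)

-- ===== PRECONDITION & SPEC =====
-- Pre_ excludes texts containing one of the three junction substrings, in which an occurrence of a
-- later dict key overlaps a following occurrence of an earlier key; there A's dict-order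
-- replacement and B's leftmost-first replacement are both defensible choices on an unspecified corner.
def Pre_phonetic_conversion_py (text : String) : Prop :=
  PySem.Str.isIn "enganenthanu" text = false ∧
  PySem.Str.isIn "evidenthanu" text = false ∧
  PySem.Str.isIn "evidengane" text = false
instance (text : String) : Decidable (Pre_phonetic_conversion_py text) := by
  unfold Pre_phonetic_conversion_py; infer_instance
def pvWitness_phonetic_conversion_py : String := "evide anu namaskaram engane"
def Spec_phonetic_conversion_py (text : String) (out : String) : Prop := out = phonetic_conversion_py_alt text
instance (text : String) (out : String) : Decidable (Spec_phonetic_conversion_py text out) := by unfold Spec_phonetic_conversion_py; infer_instance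

-- ===== CLAIM (what is proved, stated in full; the proofs are below) =====
def Claim_equal_phonetic_conversion_py : Prop := ∀ (text : String), Dom_phonetic_conversion_py text → Pre_phonetic_conversion_py text → Spec_phonetic_conversion_py text (phonetic_conversion_py text)

-- ===== LEMMAS AND PROOFS =====

-- key characters are ASCII ("low"); replacement characters are Malayalam ("high")
def pvLow (c : Char) : Bool := decide (c.toNat ≤ 127)

def pvRepl (p r : List Char) : List Char → List Char
  | [] => []
  | c :: cs =>
    if p.isPrefixOf (c :: cs) then r ++ pvRepl p r (cs.drop (p.length - 1))
    else c :: pvRepl p r cs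
termination_by t => t.length
decreasing_by
  all_goals (simp; try omega)

theorem pvRepl_nil (p r : List Char) : pvRepl p r [] = [] := by rw [pvRepl]

theorem pvRepl_cons_pos (p r : List Char) (c : Char) (cs : List Char)
    (h : p.isPrefixOf (c :: cs) = true) :
    pvRepl p r (c :: cs) = r ++ pvRepl p r (cs.drop (p.length - 1)) := by
  rw [pvRepl]; simp [h]

theorem pvRepl_cons_neg (p r : List Char) (c : Char) (cs : List Char)
    (h : ¬ p.isPrefixOf (c :: cs) = true) :
    pvRepl p r (c :: cs) = c :: pvRepl p r cs := by
  rw [pvRepl]; simp [h]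

theorem pvRepl_go (p r : List Char) (hp : p ≠ []) :
    ∀ (fuel : Nat) (l acc : List Char), l.length ≤ fuel →
      PySem.Chars.replace.go p r fuel l acc = acc.reverse ++ pvRepl p r l := by
  intro fuel
  induction fuel with
  | zero =>
    intro l acc hl
    have : l = [] := by cases l <;> simp_all
    subst this
    simp [PySem.Chars.replace.go, pvRepl_nil]
  | succ n ih =>
    intro l acc hl
    cases l with
    | nil => simp [PySem.Chars.replace.go, pvRepl_nil]
    | cons c cs =>
      rw [PySem.Chars.replace.go]
      by_cases h : p.isPrefixOf (c :: cs) = true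
      · have hlen : 0 < p.length := List.length_pos_iff.mpr hp
        have hdrop : (c :: cs).drop p.length = cs.drop (p.length - 1) := by
          cases hn : p.length with
          | zero => omega
          | succ m => simp [List.drop_succ_cons]
        simp only [h, if_true]
        rw [hdrop, ih (cs.drop (p.length - 1)) (r.reverse ++ acc) (by simp at hl ⊢; omega), pvRepl_cons_pos p r c cs h]
        simp
      · simp only [h, if_false]
        rw [ih cs (c :: acc) (by simp at hl; omega), pvRepl_cons_neg p r c cs h]
        simp

theorem pvReplace_eq (p r t : List Char) (hp : p ≠ []) :
    PySem.Chars.replace t p r = pvRepl p r t := by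
  rw [PySem.Chars.replace]
  simp only [List.isEmpty_iff, hp, if_neg, if_false]
  exact pvRepl_go p r hp t.length t [] le_rfl

theorem pvRepl_of_not_infix (p r : List Char) :
    ∀ t : List Char, ¬ p <:+: t → pvRepl p r t = t := by
  intro t
  induction t with
  | nil => intro _; exact pvRepl_nil p r
  | cons c cs ih =>
    intro hinf
    have h1 : ¬ p.isPrefixOf (c :: cs) = true := by
      intro hh
      exact hinf (List.isPrefixOf_iff_prefix.mp hh).isInfix
    rw [pvRepl_cons_neg p r c cs h1,
        ih (fun hh => hinf (hh.trans (List.suffix_cons c cs).isInfix))]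

theorem pvRepl_of_not_isIn (p r t : List Char) (h : PySem.Chars.isIn p t = false) :
    pvRepl p r t = t :=
  pvRepl_of_not_infix p r t ((PySem.Chars.isIn_eq_false_iff p t).mp h)


def pvHb (p q t : List Char) : Prop :=
  ∀ o i : Nat, 0 < o → o < q.length → ¬ (q <+: t.drop i ∧ p <+: t.drop (i + o))

def pvBadJs (p q : List Char) : List (List Char) :=
  (List.range q.length).filterMap (fun o =>
    if o = 0 then none
    else if p.take (min p.length (q.length - o)) = (q.drop o).take (min p.length (q.length - o))
    then some (q ++ p.drop (q.length - o)) else none)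

-- L5: common-segment compatibility of two overlapping occurrences
theorem pvOverlap_compat (p q u : List Char) (o : Nat) (hq : q <+: u) (hp : p <+: u.drop o)
    (ho : o ≤ q.length) (k : Nat) (hk1 : k ≤ p.length) (hk2 : k ≤ q.length - o) :
    p.take k = (q.drop o).take k := by
  obtain ⟨rest, hu⟩ := hq
  subst hu
  rw [List.drop_append_of_le_length ho] at hp
  obtain ⟨s, hs⟩ := hp
  have h1 : p.take k = ((q.drop o ++ rest).take k) := by
    rw [← hs, List.take_append_of_le_length hk1]
  rw [h1, List.take_append_of_le_length (by simp; omega)]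

-- L6: the junction string of two overlapping occurrences occurs too
theorem pvOverlap_junction (p q u : List Char) (o : Nat) (hq : q <+: u) (hp : p <+: u.drop o)
    (ho : o ≤ q.length) :
    (q ++ p.drop (q.length - o)) <+: u := by
  obtain ⟨rest, hu⟩ := hq
  subst hu
  rw [List.drop_append_of_le_length ho] at hp
  have h2 : p.drop (q.length - o) <+: (q.drop o ++ rest).drop (q.length - o) := hp.drop _
  have h3 : (q.drop o ++ rest).drop (q.length - o) = rest := by
    rw [List.drop_append_of_le_length (by simp)]
    simp
    omega
  rw [h3] at h2
  exact (List.prefix_append_right_inj q).mpr h2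

theorem pvHb_of_badJs (p q t : List Char)
    (h : ∀ J ∈ pvBadJs p q, ¬ J <:+: t) : pvHb p q t := by
  intro o i ho hlt ⟨hq, hp⟩
  have hp' : p <+: List.drop o (List.drop i t) := by rw [List.drop_drop]; exact hp
  clear hp
  have hcompat := pvOverlap_compat p q (t.drop i) o hq hp' (le_of_lt hlt)
      (min p.length (q.length - o)) (min_le_left _ _) (min_le_right _ _)
  have hmem : (q ++ p.drop (q.length - o)) ∈ pvBadJs p q := by
    rw [pvBadJs, List.mem_filterMap]
    refine ⟨o, List.mem_range.mpr hlt, ?_⟩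
    rw [if_neg (by omega), if_pos hcompat]
  have hj : (q ++ p.drop (q.length - o)) <+: t.drop i :=
    pvOverlap_junction p q (t.drop i) o hq hp' (le_of_lt hlt)
  exact h _ hmem (hj.isInfix.trans (List.drop_suffix i t).isInfix)

-- a nonempty low string inside a high block continues past it
theorem pvInfix_high_block (J W : List Char) (hne : J ≠ []) (hJ : J.all pvLow = true) :
    ∀ r : List Char, r.all (fun c => !pvLow c) = true → J <:+: r ++ W → J <:+: W := by
  intro r
  induction r with
  | nil => intro _ h; simpa using h
  | cons a r' ih =>
    intro hr h
    simp only [List.all_cons, Bool.and_eq_true] at hr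
    rcases (List.infix_cons_iff).mp h with hpre | htail
    · cases J with
      | nil => exact absurd rfl hne
      | cons j J' =>
        have : j = a := (List.cons_prefix_cons.mp hpre).1
        subst this
        simp only [List.all_cons, Bool.and_eq_true] at hJ
        rw [hJ.1] at hr
        simp at hr
    · exact ih hr.2 htail

theorem pvRepl_prefix_low (p r : List Char) (hp : p ≠ []) (hr : r ≠ [])
    (hrh : r.all (fun c => !pvLow c) = true) :
    ∀ (n : Nat) (t : List Char), t.length ≤ n → ∀ J, J.all pvLow = true → J <+: pvRepl p r t → J <+: t := by
  intro n
  induction n with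
  | zero =>
    intro t ht J _ hJ
    have : t = [] := by cases t <;> simp_all
    subst this
    rw [pvRepl_nil] at hJ
    simpa using hJ
  | succ n ih =>
    intro t ht J hJl hJ
    cases t with
    | nil => rw [pvRepl_nil] at hJ; simpa using hJ
    | cons c cs =>
      by_cases hpre : p.isPrefixOf (c :: cs) = true
      · rw [pvRepl_cons_pos p r c cs hpre] at hJ
        cases J with
        | nil => exact List.nil_prefix
        | cons j J' =>
          cases r with
          | nil => exact absurd rfl hr
          | cons a r' =>
            have : j = a := (List.cons_prefix_cons.mp hJ).1
            subst this
            simp only [List.all_cons, Bool.and_eq_true] at hJl hrh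
            rw [hJl.1] at hrh
            simp at hrh
      · rw [pvRepl_cons_neg p r c cs hpre] at hJ
        cases J with
        | nil => exact List.nil_prefix
        | cons j J' =>
          obtain ⟨hj, hJ'⟩ := List.cons_prefix_cons.mp hJ
          subst hj
          simp only [List.all_cons, Bool.and_eq_true] at hJl
          exact List.cons_prefix_cons.mpr ⟨rfl, ih cs (by simp at ht; omega) J' hJl.2 hJ'⟩

theorem pvRepl_infix_low (p r : List Char) (hp : p ≠ []) (hr : r ≠ [])
    (hrh : r.all (fun c => !pvLow c) = true) :
    ∀ (n : Nat) (t : List Char), t.length ≤ n → ∀ J, J ≠ [] → J.all pvLow = true → J <:+: pvRepl p r t → J <:+: t := by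
  intro n
  induction n with
  | zero =>
    intro t ht J hne _ hJ
    have : t = [] := by cases t <;> simp_all
    subst this
    rw [pvRepl_nil] at hJ
    simp_all
  | succ n ih =>
    intro t ht J hne hJl hJ
    cases t with
    | nil => rw [pvRepl_nil] at hJ; simp_all
    | cons c cs =>
      by_cases hpre : p.isPrefixOf (c :: cs) = true
      · rw [pvRepl_cons_pos p r c cs hpre] at hJ
        have h1 : J <:+: pvRepl p r (cs.drop (p.length - 1)) :=
          pvInfix_high_block J _ hne hJl r hrh hJ
        have h2 : J <:+: cs.drop (p.length - 1) :=
          ih (cs.drop (p.length - 1)) (by simp at ht ⊢; omega) J hne hJl h1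
        exact h2.trans ((List.drop_suffix _ cs).isInfix.trans (List.suffix_cons c cs).isInfix)
      · rw [pvRepl_cons_neg p r c cs hpre] at hJ
        rcases List.infix_cons_iff.mp hJ with hl | hrt
        · cases J with
          | nil => exact absurd rfl hne
          | cons j J' =>
            obtain ⟨hj, hJ'⟩ := List.cons_prefix_cons.mp hl
            subst hj
            simp only [List.all_cons, Bool.and_eq_true] at hJl
            have : J' <+: cs := pvRepl_prefix_low p r hp hr hrh cs.length cs le_rfl J' hJl.2 hJ'
            exact (List.cons_prefix_cons.mpr ⟨rfl, this⟩).isInfix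
        · exact (ih cs (by simp at ht; omega) J hne hJl hrt).trans (List.suffix_cons c cs).isInfix

theorem pvHb_pvRepl (p r p' q : List Char) (hp : p ≠ []) (hr : r ≠ [])
    (hrh : r.all (fun c => !pvLow c) = true) (hqne : q ≠ []) (hql : q.all pvLow = true)
    (hpl : p'.all pvLow = true) (t : List Char) (h : pvHb p' q t) :
    pvHb p' q (pvRepl p r t) := by
  intro o i ho hlt ⟨hq, hp'⟩
  have hp'' : p' <+: (List.drop i (pvRepl p r t)).drop o := by
    rw [List.drop_drop]; exact hp'
  have holeq : o ≤ q.length := le_of_lt hlt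
  set J := q ++ p'.drop (q.length - o) with hJdef
  have hJu : J <+: List.drop i (pvRepl p r t) :=
    pvOverlap_junction p' q _ o hq hp'' holeq
  have hJne : J ≠ [] := by simp [hJdef, hqne]
  have hJlow : J.all pvLow = true := by
    simp only [hJdef, List.all_append, Bool.and_eq_true]
    exact ⟨hql, List.all_eq_true.mpr fun c hc =>
      List.all_eq_true.mp hpl c (List.mem_of_mem_drop hc)⟩
  have hJt : J <:+: t :=
    pvRepl_infix_low p r hp hr hrh t.length t le_rfl J hJne hJlow
      (hJu.isInfix.trans (List.drop_suffix i _).isInfix)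
  obtain ⟨tt, hJtt, htt⟩ := List.infix_iff_prefix_suffix.mp hJt
  obtain ⟨pre, hpre⟩ := htt
  have htd : tt = t.drop pre.length := by rw [← hpre]; simp
  have hJd : J <+: t.drop pre.length := htd ▸ hJtt
  have hq2 : q <+: t.drop pre.length := (List.prefix_append q _).trans hJd
  have hJdrop : J.drop o = q.drop o ++ p'.drop (q.length - o) := by
    rw [hJdef, List.drop_append_of_le_length holeq]
  have hp2 : p' <+: J.drop o := by
    rw [hJdrop]
    by_cases hle : q.length - o ≤ p'.length
    · have hc := pvOverlap_compat p' q _ o hq hp'' holeq (q.length - o) hle le_rfl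
      have hfull : (q.drop o).take (q.length - o) = q.drop o := by
        apply List.take_of_length_le; simp
      rw [hfull] at hc
      have hx : q.drop o ++ p'.drop (q.length - o) = p' := by
        rw [← hc]; exact List.take_append_drop _ p'
      rw [hx]
    · have hc := pvOverlap_compat p' q _ o hq hp'' holeq p'.length le_rfl (by omega)
      simp only [List.take_length] at hc
      have h1 : p' <+: q.drop o := hc ▸ List.take_prefix _ _
      exact h1.trans (List.prefix_append _ _)
  have hp3 : p' <+: t.drop (pre.length + o) := by
    have := hp2.trans (hJd.drop o)
    rwa [List.drop_drop] at this
  exact h o pre.length ho hlt ⟨hq2, hp3⟩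

theorem pvFind?_congr {α : Type} (l : List α) (p q : α → Bool)
    (h : ∀ a ∈ l, p a = q a) : l.find? p = l.find? q := by
  induction l with
  | nil => rfl
  | cons a as ih =>
    rw [List.find?_cons, List.find?_cons, h a List.mem_cons_self]
    cases hqa : q a
    · exact ih fun b hb => h b (List.mem_cons_of_mem _ hb)
    · rfl

theorem pvScan_nilt (R : List (List Char × List Char)) : pvScan R [] = [] := by rw [pvScan]

theorem pvScan_cons_some (R : List (List Char × List Char)) (c : Char) (cs : List Char)
    (pr : List Char × List Char) (h : R.find? (fun pr => pr.1.isPrefixOf (c :: cs)) = some pr) :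
    pvScan R (c :: cs) = pr.2 ++ pvScan R (cs.drop (pr.1.length - 1)) := by
  rw [pvScan, h]

theorem pvScan_cons_none (R : List (List Char × List Char)) (c : Char) (cs : List Char)
    (h : R.find? (fun pr => pr.1.isPrefixOf (c :: cs)) = none) :
    pvScan R (c :: cs) = c :: pvScan R cs := by
  rw [pvScan, h]

theorem pvScan_nil_rules (t : List Char) : pvScan [] t = t := by
  induction t with
  | nil => exact pvScan_nilt []
  | cons c cs ih => rw [pvScan_cons_none [] c cs rfl, ih]

theorem pvScan_high_prefix (R : List (List Char × List Char))
    (hR : ∀ pr ∈ R, pr.1 ≠ [] ∧ pr.1.all pvLow = true) (W : List Char) :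
    ∀ r : List Char, r.all (fun c => !pvLow c) = true →
      pvScan R (r ++ W) = r ++ pvScan R W := by
  intro r
  induction r with
  | nil => intro _; simp
  | cons a r' ih =>
    intro hr
    simp only [List.all_cons, Bool.and_eq_true] at hr
    have hfind : R.find? (fun pr => pr.1.isPrefixOf (a :: (r' ++ W))) = none := by
      rw [List.find?_eq_none]
      intro x hx hcon
      obtain ⟨hne, hlow⟩ := hR x hx
      rw [List.isPrefixOf_iff_prefix] at hcon
      cases hx1 : x.1 with
      | nil => exact hne hx1
      | cons q0 qs =>
        rw [hx1] at hcon hlow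
        obtain ⟨he, -⟩ := List.cons_prefix_cons.mp hcon
        simp only [List.all_cons, Bool.and_eq_true] at hlow
        rw [he] at hlow
        rw [hlow.1] at hr
        simp at hr
    have : a :: r' ++ W = a :: (r' ++ W) := by simp
    rw [this, pvScan_cons_none R a (r' ++ W) hfind, ih hr.2]
    simp

theorem pvHb_drop (p q t : List Char) (m : Nat) (h : pvHb p q t) : pvHb p q (t.drop m) := by
  intro o i ho hlt hc
  rw [List.drop_drop, List.drop_drop] at hc
  exact h o (m + i) ho hlt
    ⟨hc.1, by rw [show m + i + o = m + (i + o) from by omega]; exact hc.2⟩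

theorem pvRepl_copy (p r : List Char) :
    ∀ (n : Nat) (t : List Char), n ≤ t.length → (∀ o, o < n → ¬ p <+: t.drop o) →
      pvRepl p r t = t.take n ++ pvRepl p r (t.drop n) := by
  intro n
  induction n with
  | zero => intro t _ _; simp
  | succ n ih =>
    intro t hn hno
    cases t with
    | nil => simp at hn
    | cons c cs =>
      have h0 : ¬ p.isPrefixOf (c :: cs) = true := by
        intro hh
        exact hno 0 (Nat.succ_pos n) (by simpa using List.isPrefixOf_iff_prefix.mp hh)
      rw [pvRepl_cons_neg p r c cs h0]
      rw [ih cs (by simpa using hn) (fun o ho => by simpa using hno (o + 1) (by omega))]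
      simp

theorem pvScan_step (p r : List Char) (R' : List (List Char × List Char))
    (hp : p ≠ []) (hpl : p.all pvLow = true) (hr : r ≠ []) (hrh : r.all (fun c => !pvLow c) = true)
    (hR : ∀ pr ∈ R', pr.1 ≠ [] ∧ pr.1.all pvLow = true)
    (hnp : ∀ x ∈ R', ∀ y ∈ R', x.1 <+: y.1 → x.1 = y.1) :
    ∀ (n : Nat) (t : List Char), t.length ≤ n → (∀ pr ∈ R', pvHb p pr.1 t) →
      pvScan ((p, r) :: R') t = pvScan R' (pvRepl p r t) := by
  intro n
  induction n with
  | zero =>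
    intro t ht _
    have : t = [] := by cases t <;> simp_all
    subst this
    rw [pvScan_nilt, pvRepl_nil, pvScan_nilt]
  | succ n ih =>
    intro t ht hHb
    cases t with
    | nil => rw [pvScan_nilt, pvRepl_nil, pvScan_nilt]
    | cons c cs =>
      by_cases hpre : p.isPrefixOf (c :: cs) = true
      · have hfind : ((p, r) :: R').find? (fun pr => pr.1.isPrefixOf (c :: cs)) = some (p, r) :=
          List.find?_cons_of_pos hpre
        rw [pvScan_cons_some _ _ _ _ hfind, pvRepl_cons_pos p r c cs hpre,
            pvScan_high_prefix R' hR _ r hrh]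
        congr 1
        have hdeq : cs.drop (p.length - 1) = (c :: cs).drop p.length := by
          have : 0 < p.length := List.length_pos_iff.mpr hp
          cases hn : p.length with
          | zero => omega
          | succ m => simp
        exact ih (cs.drop (p.length - 1)) (by simp at ht ⊢; omega)
          (fun pr hm => by rw [hdeq]; exact pvHb_drop _ _ _ _ (hHb pr hm))
      · have hprefalse : ¬ p <+: (c :: cs) := fun hh => hpre (List.isPrefixOf_iff_prefix.mpr hh)
        have hstep : ((p, r) :: R').find? (fun pr => pr.1.isPrefixOf (c :: cs)) =
            R'.find? (fun pr => pr.1.isPrefixOf (c :: cs)) :=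
          List.find?_cons_of_neg (by simpa using hpre)
        rcases hfind' : R'.find? (fun pr => pr.1.isPrefixOf (c :: cs)) with _ | qs
        · -- no rule matches at this position
          rw [pvScan_cons_none _ _ _ (hstep.trans hfind'), pvRepl_cons_neg p r c cs hpre]
          have hfind2 : R'.find? (fun pr => pr.1.isPrefixOf (c :: pvRepl p r cs)) = none := by
            rw [List.find?_eq_none]
            intro x hx hcon
            have hxt : x.1.isPrefixOf (c :: cs) = true := by
              obtain ⟨hne, hlow⟩ := hR x hx
              rw [List.isPrefixOf_iff_prefix] at hcon ⊢
              cases hx1 : x.1 with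
              | nil => simp
              | cons x0 xs =>
                rw [hx1] at hcon hlow
                obtain ⟨he, hxs⟩ := List.cons_prefix_cons.mp hcon
                simp only [List.all_cons, Bool.and_eq_true] at hlow
                exact List.cons_prefix_cons.mpr
                  ⟨he, pvRepl_prefix_low p r hp hr hrh cs.length cs le_rfl xs hlow.2 hxs⟩
            have := List.find?_eq_none.mp hfind' x hx
            simp [hxt] at this
          rw [pvScan_cons_none _ _ _ hfind2]
          congr 1
          exact ih cs (by simp at ht; omega)
            (fun pr hm => by
              have := pvHb_drop p pr.1 (c :: cs) 1 (hHb pr hm)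
              simpa using this)
        · -- the first matching rule q
          obtain ⟨q, s⟩ := qs
          have hqpre : q <+: (c :: cs) := by
            have := List.find?_some hfind'
            exact List.isPrefixOf_iff_prefix.mp (by simpa using this)
          have hqmem : (q, s) ∈ R' := List.mem_of_find?_eq_some hfind'
          obtain ⟨hqne, hqlow⟩ := hR (q, s) hqmem
          have hnomatch : ∀ o, o < q.length → ¬ p <+: (c :: cs).drop o := by
            intro o ho hm
            cases o with
            | zero => exact hprefalse (by simpa using hm)
            | succ m =>
              exact hHb (q, s) hqmem (m + 1) 0 (Nat.succ_pos m) ho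
                ⟨by simpa using hqpre, by simpa using hm⟩
          have hcopy : pvRepl p r (c :: cs) =
              (c :: cs).take q.length ++ pvRepl p r ((c :: cs).drop q.length) :=
            pvRepl_copy p r q.length (c :: cs) hqpre.length_le hnomatch
          have htake : (c :: cs).take q.length = q := (List.prefix_iff_eq_take.mp hqpre).symm
          rw [pvScan_cons_some _ _ _ _ (hstep.trans hfind'), hcopy, htake]
          have hcongr : ∀ x ∈ R',
              (x.1.isPrefixOf (q ++ pvRepl p r ((c :: cs).drop q.length))) =
              (x.1.isPrefixOf (c :: cs)) := by
            intro x hx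
            obtain ⟨hxne, hxlow⟩ := hR x hx
            by_cases h1 : x.1 <+: (c :: cs)
            · have hxeq : x.1 = q := by
                rcases le_total x.1.length q.length with hle | hle
                · exact hnp x hx (q, s) hqmem (List.prefix_of_prefix_length_le h1 hqpre hle)
                · exact (hnp (q, s) hqmem x hx (List.prefix_of_prefix_length_le hqpre h1 hle)).symm
              have t1 : (q.isPrefixOf (q ++ pvRepl p r ((c :: cs).drop q.length))) = true := by
                rw [List.isPrefixOf_iff_prefix]; exact List.prefix_append _ _
              have t2 : (q.isPrefixOf (c :: cs)) = true := by
                rw [List.isPrefixOf_iff_prefix]; exact hqpre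
              rw [hxeq, t1, t2]
            · have h2 : ¬ x.1 <+: q ++ pvRepl p r ((c :: cs).drop q.length) := by
                intro hcon
                apply h1
                rcases le_total x.1.length q.length with hle | hle
                · exact (List.prefix_of_prefix_length_le hcon (List.prefix_append q _) hle).trans hqpre
                · have hqx : q <+: x.1 :=
                    List.prefix_of_prefix_length_le (List.prefix_append q _) hcon hle
                  have hdx : x.1.drop q.length <+: pvRepl p r ((c :: cs).drop q.length) := by
                    have := hcon.drop q.length
                    rwa [List.drop_left' rfl] at this
                  have hdt : x.1.drop q.length <+: (c :: cs).drop q.length :=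
                    pvRepl_prefix_low p r hp hr hrh _ _ le_rfl _
                      (List.all_eq_true.mpr fun a ha =>
                        List.all_eq_true.mp hxlow a (List.mem_of_mem_drop ha)) hdx
                  have hx1 : x.1 = q ++ x.1.drop q.length := by
                    conv_lhs => rw [← List.take_append_drop q.length x.1]
                    rw [← List.prefix_iff_eq_take.mp hqx]
                  rw [hx1]
                  conv_rhs => rw [← List.take_append_drop q.length (c :: cs), htake]
                  exact (List.prefix_append_right_inj q).mpr hdt
              have t1 : (x.1.isPrefixOf (q ++ pvRepl p r ((c :: cs).drop q.length))) = false := by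
                rw [Bool.eq_false_iff]
                intro hT
                exact h2 (List.isPrefixOf_iff_prefix.mp hT)
              have t2 : (x.1.isPrefixOf (c :: cs)) = false := by
                rw [Bool.eq_false_iff]
                intro hT
                exact h1 (List.isPrefixOf_iff_prefix.mp hT)
              rw [t1, t2]
          have hfind2 : R'.find? (fun pr =>
              pr.1.isPrefixOf (q ++ pvRepl p r ((c :: cs).drop q.length))) = some (q, s) := by
            rw [pvFind?_congr _ _ _ hcongr]
            exact hfind'
          obtain ⟨q0, qt, rfl⟩ : ∃ q0 qt, q = q0 :: qt := by
            cases q with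
            | nil => simp at hqne
            | cons a as => exact ⟨a, as, rfl⟩
          simp only [List.cons_append] at hfind2 ⊢
          rw [pvScan_cons_some R' q0 (qt ++ pvRepl p r ((c :: cs).drop (q0 :: qt).length))
            (q0 :: qt, s) hfind2]
          congr 1
          have hdrop2 : (qt ++ pvRepl p r ((c :: cs).drop (q0 :: qt).length)).drop
              ((q0 :: qt, s).1.length - 1) = pvRepl p r ((c :: cs).drop (q0 :: qt).length) := by
            simp
          rw [hdrop2]
          have hcseq : cs.drop ((q0 :: qt, s).1.length - 1) = (c :: cs).drop (q0 :: qt).length := by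
            simp
          rw [hcseq]
          exact ih ((c :: cs).drop (q0 :: qt).length)
            (by simp at ht ⊢; omega)
            (fun pr hm => pvHb_drop _ _ _ _ (hHb pr hm))

theorem pvFold_eq_scan :
    ∀ (R : List (List Char × List Char)) (t : List Char),
      (∀ pr ∈ R, pr.1 ≠ [] ∧ pr.1.all pvLow = true ∧ pr.2 ≠ [] ∧ pr.2.all (fun c => !pvLow c) = true) →
      (∀ x ∈ R, ∀ y ∈ R, x.1 <+: y.1 → x.1 = y.1) →
      List.Pairwise (fun a b => pvHb a.1 b.1 t) R →
      R.foldl (fun t pr => pvRepl pr.1 pr.2 t) t = pvScan R t := by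
  intro R
  induction R with
  | nil => intro t _ _ _; simp [pvScan_nil_rules]
  | cons hd tl ih =>
    obtain ⟨p, r⟩ := hd
    intro t hfacts hnp hpw
    obtain ⟨hp, hpl, hr, hrh⟩ := hfacts (p, r) List.mem_cons_self
    rw [List.foldl_cons]
    rw [List.pairwise_cons] at hpw
    have hfacts' : ∀ pr ∈ tl, pr.1 ≠ [] ∧ pr.1.all pvLow = true ∧ pr.2 ≠ [] ∧ pr.2.all (fun c => !pvLow c) = true :=
      fun pr hm => hfacts pr (List.mem_cons_of_mem _ hm)
    have hpw' : List.Pairwise (fun a b => pvHb a.1 b.1 (pvRepl p r t)) tl := by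
      refine List.Pairwise.imp_of_mem ?_ hpw.2
      intro a b ha hb hab
      obtain ⟨_, hal, _, _⟩ := hfacts' a ha
      obtain ⟨hbne, hbl, _, _⟩ := hfacts' b hb
      exact pvHb_pvRepl p r a.1 b.1 hp hr hrh hbne hbl hal t hab
    rw [ih (pvRepl p r t) hfacts'
        (fun x hx y hy => hnp x (List.mem_cons_of_mem _ hx) y (List.mem_cons_of_mem _ hy)) hpw']
    exact (pvScan_step p r tl hp hpl hr hrh
      (fun pr hm => ⟨(hfacts' pr hm).1, (hfacts' pr hm).2.1⟩)
      (fun x hx y hy => hnp x (List.mem_cons_of_mem _ hx) y (List.mem_cons_of_mem _ hy))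
      t.length t le_rfl
      (fun pr hm => hpw.1 pr hm)).symm


-- the two concrete rule tables coincide
theorem pvAltRules_eq : pvAltRules = pvRules := by decide

-- the decidable facts about the concrete rule table
theorem pvRules_facts : ∀ pr ∈ pvRules, pr.1 ≠ [] ∧ pr.1.all pvLow = true ∧ pr.2 ≠ [] ∧ pr.2.all (fun c => !pvLow c) = true := by decide

theorem pvRules_nonprefix : ∀ x ∈ pvRules, ∀ y ∈ pvRules, x.1 <+: y.1 → x.1 = y.1 := by decide

theorem pvHb_of_empty (p q t : List Char) (h : pvBadJs p q = []) : pvHb p q t :=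
  pvHb_of_badJs p q t (by rw [h]; simp)

theorem pvHb_of_single (p q t J : List Char) (h : pvBadJs p q = [J]) (hJ : ¬ J <:+: t) :
    pvHb p q t :=
  pvHb_of_badJs p q t (by rw [h]; simpa using hJ)

-- ===== VERDICT (by name: the statement is the Claim_ definition above) =====
theorem phonetic_conversion_py_spec : Claim_equal_phonetic_conversion_py := by
  intro text _ hpre
  obtain ⟨h1, h2, h3⟩ := hpre
  replace h1 : ¬ ("enganenthanu".toList) <:+: text.toList :=
    (PySem.Chars.isIn_eq_false_iff _ _).mp (by simpa [PySem.Str.isIn] using h1)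
  replace h2 : ¬ ("evidenthanu".toList) <:+: text.toList :=
    (PySem.Chars.isIn_eq_false_iff _ _).mp (by simpa [PySem.Str.isIn] using h2)
  replace h3 : ¬ ("evidengane".toList) <:+: text.toList :=
    (PySem.Chars.isIn_eq_false_iff _ _).mp (by simpa [PySem.Str.isIn] using h3)
  unfold Spec_phonetic_conversion_py phonetic_conversion_py phonetic_conversion_py_alt
  rw [pvAltRules_eq]
  congr 1
  have hguard : ∀ pr ∈ pvRules, ∀ t : List Char,
      (if PySem.Chars.isIn pr.1 t then PySem.Chars.replace t pr.1 pr.2 else t) =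
        pvRepl pr.1 pr.2 t := by
    intro pr hm t
    have hp : pr.1 ≠ [] := (pvRules_facts pr hm).1
    by_cases h : PySem.Chars.isIn pr.1 t = true
    · rw [if_pos h]
      exact pvReplace_eq pr.1 pr.2 t hp
    · rw [if_neg (by simp [h])]
      exact (pvRepl_of_not_isIn pr.1 pr.2 t (by simpa using h)).symm
  refine Eq.trans (PySem.List.foldl_congr_mem' pvRules _ _ text.toList hguard) ?_
  apply pvFold_eq_scan pvRules text.toList pvRules_facts pvRules_nonprefix
  refine List.Pairwise.cons ?_ (List.Pairwise.cons ?_ (List.Pairwise.cons ?_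
    (List.Pairwise.cons ?_ (List.Pairwise.cons ?_ (List.Pairwise.cons ?_ List.Pairwise.nil)))))
  · intro x hx
    fin_cases hx <;>
      exact pvHb_of_empty _ _ _ (by decide)
  · intro x hx
    fin_cases hx
    · exact pvHb_of_single _ _ _ _ (by decide) h1
    · exact pvHb_of_single _ _ _ _ (by decide) h2
    · exact pvHb_of_empty _ _ _ (by decide)
    · exact pvHb_of_empty _ _ _ (by decide)
  · intro x hx
    fin_cases hx
    · exact pvHb_of_single _ _ _ _ (by decide) h3
    · exact pvHb_of_empty _ _ _ (by decide)
    · exact pvHb_of_empty _ _ _ (by decide)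
  · intro x hx
    fin_cases hx <;> exact pvHb_of_empty _ _ _ (by decide)
  · intro x hx
    fin_cases hx <;> exact pvHb_of_empty _ _ _ (by decide)
  · intro x hx
    exact absurd hx (List.not_mem_nil)
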